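-- pv_equiv track=rewrite | github.com/RohanChimbaikar/Aura | backend/aura-model-v1/aura_v2r_receiver.py | same_length_letter_score
-- ===== SOURCE A (Python) =====
-- def same_length_letter_score(candidate, raw_token):
--     """
--     Score how well a candidate matches raw token while allowing weird chars in raw token.
--     """
--     if len(candidate) != len(raw_token):
--         return -999
--
--     score = 0
--     for c, r in zip(candidate.lower(), raw_token.lower()):
--         if r.isalpha():
--             if c == r:
--                 score += 2
--             else:
--                 score -= 1
--         else:
--             # suspicious/non-letter in raw: candidate letter is plausible
--             score += 1
--     return score
-- ===== SOURCE B (Python) =====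
-- def same_length_letter_score(candidate, raw_token):
--     """
--     Score how well a candidate matches raw token while allowing weird chars in raw token.
--     """
--     if len(candidate) != len(raw_token):
--         return -999
--     pairs = list(zip(candidate.lower(), raw_token.lower()))
--     n = len(pairs)
--     a = sum(1 for c, r in pairs if r.isalpha())
--     m = sum(1 for c, r in pairs if r.isalpha() and c == r)
--     return 3 * m - 2 * a + n
-- ===== Notes on version B (the rewrite author's own statement) =====
-- stated objective: alternative
-- what changed: Replaces A's per-character branching accumulator with three aggregate counts (length, alpha positions, matching alpha positions) over the zipped lowercased strings, combined by the closed-form 3*m - 2*a + n.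
import Mathlib
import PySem

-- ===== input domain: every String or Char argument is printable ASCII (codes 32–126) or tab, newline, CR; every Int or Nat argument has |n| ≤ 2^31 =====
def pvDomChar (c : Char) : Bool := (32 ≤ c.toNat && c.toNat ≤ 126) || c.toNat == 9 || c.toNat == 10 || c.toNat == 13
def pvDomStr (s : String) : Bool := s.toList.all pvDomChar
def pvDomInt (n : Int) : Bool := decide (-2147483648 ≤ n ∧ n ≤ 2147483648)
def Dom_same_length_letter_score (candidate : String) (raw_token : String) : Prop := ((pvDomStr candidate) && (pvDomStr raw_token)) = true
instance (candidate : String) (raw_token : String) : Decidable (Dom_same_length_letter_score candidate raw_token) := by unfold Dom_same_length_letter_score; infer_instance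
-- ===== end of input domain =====

-- B replaces A's per-character branching accumulator with three aggregate counts
-- over the zipped lowercased strings and the closed-form 3*m - 2*a + n (objective: alternative decomposition).


-- ===== PORT A =====
def same_length_letter_score (candidate : String) (raw_token : String) : Int :=
  if PySem.Str.len candidate ≠ PySem.Str.len raw_token then -999
  else
    ((PySem.Str.lower candidate).toList.zip (PySem.Str.lower raw_token).toList).foldl
      (fun score p =>
        if PySem.Chars.isalpha p.2 then
          if p.1 == p.2 then score + 2 else score - 1
        else score + 1) 0

-- ===== PORT B =====
def same_length_letter_score_alt (candidate : String) (raw_token : String) : Int :=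
  if PySem.Str.len candidate ≠ PySem.Str.len raw_token then -999
  else
    let pairs := (PySem.Str.lower candidate).toList.zip (PySem.Str.lower raw_token).toList
    let n : Int := pairs.length
    let a : Int := (pairs.filter (fun p => PySem.Chars.isalpha p.2)).length
    let m : Int := (pairs.filter (fun p => PySem.Chars.isalpha p.2 && p.1 == p.2)).length
    3 * m - 2 * a + n

-- ===== PRECONDITION & SPEC =====
def Spec_same_length_letter_score (candidate : String) (raw_token : String) (out : Int) : Prop := out = same_length_letter_score_alt candidate raw_token
instance (candidate : String) (raw_token : String) (out : Int) : Decidable (Spec_same_length_letter_score candidate raw_token out) := by unfold Spec_same_length_letter_score; infer_instance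

-- ===== CLAIM (what is proved, stated in full; the proofs are below) =====
def Claim_equal_same_length_letter_score : Prop := ∀ (candidate : String) (raw_token : String), Dom_same_length_letter_score candidate raw_token → Spec_same_length_letter_score candidate raw_token (same_length_letter_score candidate raw_token)

-- ===== LEMMAS AND PROOFS =====
theorem pv_fold_eq_counts (l : List (Char × Char)) (s : Int) :
    l.foldl
      (fun score p =>
        if PySem.Chars.isalpha p.2 then
          if p.1 == p.2 then score + 2 else score - 1
        else score + 1) s
    = s + 3 * ((l.filter (fun p => PySem.Chars.isalpha p.2 && p.1 == p.2)).length : Int)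
        - 2 * ((l.filter (fun p => PySem.Chars.isalpha p.2)).length : Int)
        + (l.length : Int) := by
  induction l generalizing s with
  | nil => simp
  | cons hd tl ih =>
    by_cases ha : PySem.Chars.isalpha hd.2 <;> by_cases he : hd.1 == hd.2 <;>
      simp only [List.foldl_cons, List.filter_cons, List.length_cons, ha, he,
        Bool.true_and, Bool.false_and, ite_true, ite_false, Bool.and_self,
        if_true, if_false] <;>
      rw [ih] <;> push_cast <;> ring

-- ===== VERDICT (by name: the statement is the Claim_ definition above) =====
theorem same_length_letter_score_spec : Claim_equal_same_length_letter_score := by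
  intro candidate raw_token _
  unfold Spec_same_length_letter_score same_length_letter_score same_length_letter_score_alt
  simp only []
  split_ifs with h
  · rfl
  · rw [pv_fold_eq_counts]; ring
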